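-- pv_equiv track=rewrite | github.com/minarefaat1002/leetcode-solutions | 1726-tuple-with-same-product/1726-tuple-with-same-product.py | tupleSameProduct
-- ===== SOURCE A (Python) =====
-- from typing import List
--
-- def tupleSameProduct(nums: List[int]) -> int:
--     count = 0
--     multiplications = {}
--     for i in range(len(nums)):
--         for j in range(i+1,len(nums)):
--             multiplications[nums[i]*nums[j]] = multiplications.get(nums[i]*nums[j] , 0)+1
--     for item in multiplications:
--         count += multiplications[item]*(multiplications[item]-1)
--     return count*4
-- ===== SOURCE B (Python) =====
-- from typing import List
--
-- def tupleSameProduct(nums: List[int]) -> int: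
--     # sort-then-scan: sorting groups equal products contiguously, so a single
--     # run-length scan replaces the hash map entirely
--     n = len(nums)
--     products = sorted(nums[i] * nums[j] for i in range(n) for j in range(i + 1, n))
--     total = 0
--     run = 0
--     prev = None
--     for p in products:
--         if p == prev:
--             run += 1
--         else:
--             total += run * (run - 1)
--             run = 1
--             prev = p
--     total += run * (run - 1)
--     return 4 * total
-- ===== Notes on version B (the rewrite author's own statement) =====
-- stated objective: alternative
-- what changed: B replaces A's hash-map product counting with sort-then-scan: it builds the flat list of pairwise products, sorts it so equal products become contiguous, and accumulates run*(run-1) over maximal runs in one linear scan, with no dictionary and no second pass over table entries.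
import Mathlib
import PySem

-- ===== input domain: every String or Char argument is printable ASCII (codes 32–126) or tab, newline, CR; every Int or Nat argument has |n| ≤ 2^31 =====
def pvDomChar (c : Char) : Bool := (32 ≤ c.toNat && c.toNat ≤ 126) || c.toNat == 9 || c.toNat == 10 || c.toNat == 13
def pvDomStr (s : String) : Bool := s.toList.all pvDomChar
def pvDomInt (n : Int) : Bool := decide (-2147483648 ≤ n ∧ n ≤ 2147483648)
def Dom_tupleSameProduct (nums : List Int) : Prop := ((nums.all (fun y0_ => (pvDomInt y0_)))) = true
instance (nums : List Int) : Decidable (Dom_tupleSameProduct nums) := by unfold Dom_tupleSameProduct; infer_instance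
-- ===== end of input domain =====

-- B replaces the hash-map counting with sort-then-scan over the flat product list (alternative algorithm, same result).

-- ===== PORT A =====
def tupleSameProduct (nums : List Int) : Int :=
  let n : Int := nums.length
  let mults : PySem.Dict Int Int :=
    (PySem.List.pyRange 0 n 1).foldl (fun d i =>
      (PySem.List.pyRange (i + 1) n 1).foldl (fun d j =>
        let p := PySem.List.pyGetD nums i 0 * PySem.List.pyGetD nums j 0
        d.insert p (d.getD p 0 + 1)) d)
      PySem.Dict.empty
  let count : Int :=
    mults.keys.foldl (fun c k => c + mults.getD k 0 * (mults.getD k 0 - 1)) 0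
  count * 4

-- ===== PORT B =====
-- one step of B's run-length scan; state = (total, run, prev)
def pvScanStep (st : Int × Int × Option Int) (p : Int) : Int × Int × Option Int :=
  if st.2.2 = some p then (st.1, st.2.1 + 1, st.2.2)
  else (st.1 + st.2.1 * (st.2.1 - 1), 1, some p)

def tupleSameProduct_alt (nums : List Int) : Int :=
  let n : Int := nums.length
  let products : List Int :=
    PySem.List.sorted
      ((PySem.List.pyRange 0 n 1).flatMap (fun i =>
        (PySem.List.pyRange (i + 1) n 1).map (fun j =>
          PySem.List.pyGetD nums i 0 * PySem.List.pyGetD nums j 0)))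
      (fun x => x) false
  let st := products.foldl pvScanStep (0, 0, none)
  let total := st.1 + st.2.1 * (st.2.1 - 1)
  4 * total

-- ===== PRECONDITION & SPEC =====
def Spec_tupleSameProduct (nums : List Int) (out : Int) : Prop := out = tupleSameProduct_alt nums
instance (nums : List Int) (out : Int) : Decidable (Spec_tupleSameProduct nums out) := by unfold Spec_tupleSameProduct; infer_instance

-- ===== CLAIM (what is proved, stated in full; the proofs are below) =====
def Claim_equal_tupleSameProduct : Prop := ∀ (nums : List Int), Dom_tupleSameProduct nums → Spec_tupleSameProduct nums (tupleSameProduct nums)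

-- ===== LEMMAS AND PROOFS =====

-- the flat list of pairwise products both programs process
def pvProds (nums : List Int) : List Int :=
  (PySem.List.pyRange 0 (nums.length : Int) 1).flatMap (fun i =>
    (PySem.List.pyRange (i + 1) (nums.length : Int) 1).map (fun j =>
      PySem.List.pyGetD nums i 0 * PySem.List.pyGetD nums j 0))

-- the common value both sides reduce to: Σ over distinct products of c·(c−1)
def pvSumCC (P : List Int) : Int :=
  ∑ a ∈ P.toFinset, (P.count a : Int) * ((P.count a : Int) - 1)

lemma foldA_eq (nums : List Int) (d : PySem.Dict Int Int) :
    (PySem.List.pyRange 0 (nums.length : Int) 1).foldl (fun d i =>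
      (PySem.List.pyRange (i + 1) (nums.length : Int) 1).foldl (fun d j =>
        let p := PySem.List.pyGetD nums i 0 * PySem.List.pyGetD nums j 0
        d.insert p (d.getD p 0 + 1)) d) d
    = (pvProds nums).foldl (fun d x => d.insert x (d.getD x 0 + 1)) d := by
  simp [pvProds, List.flatMap, List.foldl_flatten, List.foldl_map]

-- A's frequency table over any product list is Counter, and its key sum is pvSumCC
lemma countA_eq (P : List Int) :
    (PySem.Dict.counter P (κ := Int)).keys.foldl
      (fun c k => c + (PySem.Dict.counter P).getD k 0 * ((PySem.Dict.counter P).getD k 0 - 1)) 0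
    = pvSumCC P := by
  rw [PySem.List.foldl_add]
  rw [PySem.Dict.keys_counter]
  have h1 : ((PySem.Set.ofList P).map
      (fun k => (PySem.Dict.counter P (κ := Int)).getD k 0 * ((PySem.Dict.counter P).getD k 0 - 1))).sum
      = ((PySem.Set.ofList P).map (fun k => (P.count k : Int) * ((P.count k : Int) - 1))).sum := by
    congr 1
    apply List.map_congr_left
    intro k _
    rw [PySem.Dict.getD_counter]
  rw [h1]
  have h2 : ((PySem.Set.ofList P : List Int).toFinset).sum
      (fun k => (P.count k : Int) * ((P.count k : Int) - 1))
      = ((PySem.Set.ofList P).map (fun k => (P.count k : Int) * ((P.count k : Int) - 1))).sum :=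
    List.sum_toFinset _ (PySem.Set.nodup_ofList P)
  have h3 : ((PySem.Set.ofList P : List Int).toFinset) = P.toFinset := by
    ext x
    simp [List.mem_toFinset, PySem.Set.mem_ofList]
  rw [pvSumCC, ← h3, h2]
  simp

-- in a sorted list the head does not reappear after its initial run
lemma not_mem_dropWhile_of_sorted (a : Int) (t : List Int)
    (hs : (a :: t).Pairwise (· ≤ ·)) :
    a ∉ (a :: t).dropWhile (fun x => x == a) := by
  intro hmem
  have hdw : (a :: t).dropWhile (fun x => x == a) = t.dropWhile (fun x => x == a) := by
    simp [List.dropWhile]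
  rw [hdw] at hmem
  have hsubt : List.Sublist (t.dropWhile (fun x => x == a)) t := List.dropWhile_sublist _
  cases hd : t.dropWhile (fun x => x == a) with
  | nil => simp [hd] at hmem
  | cons b v =>
    have hb : ¬ ((b == a) = true) := by
      have := List.head?_dropWhile_not (fun x => x == a) t
      rw [hd] at this
      simpa using this
    have hba : b ≠ a := by simpa using hb
    rw [hd] at hmem
    rcases List.mem_cons.mp hmem with h | h
    · exact hba h.symm
    · -- a after b inside the sorted suffix: b ≤ a; and a ≤ b since b ∈ t
      have hsuffix : (b :: v).Pairwise (· ≤ ·) := by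
        have : List.Sublist (b :: v) (a :: t) := by
          rw [← hd, ← hdw]; exact List.dropWhile_sublist _
        exact List.Pairwise.sublist this hs
      have hble : b ≤ a := (List.pairwise_cons.mp hsuffix).1 a h
      have hbt : b ∈ t := hsubt.mem (by rw [hd]; exact List.mem_cons_self)
      have haleb : a ≤ b := (List.pairwise_cons.mp hs).1 b hbt
      exact hba (le_antisymm hble haleb)

-- scanning a constant run only grows the run counter
lemma scan_replicate (k : Nat) (a t r : Int) :
    (List.replicate k a).foldl pvScanStep (t, r, some a) = (t, r + k, some a) := by
  induction k generalizing r with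
  | zero => simp
  | succ m ih =>
    rw [List.replicate_succ, List.foldl_cons]
    have : pvScanStep (t, r, some a) a = (t, r + 1, some a) := by simp [pvScanStep]
    rw [this, ih]
    have : r + 1 + (m : Int) = r + ((m : Nat) + 1 : Nat) := by push_cast; ring
    rw [this]

-- main invariant of B's scan over a sorted list
lemma scan_spec (N : Nat) : ∀ (S : List Int), S.length ≤ N → S.Pairwise (· ≤ ·) →
    ∀ (t r : Int) (pr : Option Int), (∀ x ∈ S, pr ≠ some x) →
    (S.foldl pvScanStep (t, r, pr)).1
      + (S.foldl pvScanStep (t, r, pr)).2.1 * ((S.foldl pvScanStep (t, r, pr)).2.1 - 1)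
    = t + r * (r - 1) + pvSumCC S := by
  induction N with
  | zero =>
    intro S hlen _ t r pr _
    have : S = [] := List.eq_nil_of_length_eq_zero (Nat.le_zero.mp hlen)
    subst this
    simp [pvSumCC]
  | succ n ih =>
    intro S hlen hs t r pr hfresh
    cases S with
    | nil => simp [pvSumCC]
    | cons a tl =>
      set p : Int → Bool := fun x => x == a with hp
      have htw : (a :: tl).takeWhile p = a :: tl.takeWhile p := by simp [hp, List.takeWhile]
      have hdw : (a :: tl).dropWhile p = tl.dropWhile p := by simp [hp, List.dropWhile]
      obtain ⟨S₂, hS₂⟩ : ∃ S₂, (a :: tl).dropWhile p = S₂ := ⟨_, rfl⟩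
      obtain ⟨c, hc⟩ : ∃ c, ((a :: tl).takeWhile p).length = c := ⟨_, rfl⟩
      have hrep : (a :: tl).takeWhile p = List.replicate c a := by
        rw [← hc, List.eq_replicate_length]
        intro b hb
        have := List.mem_takeWhile_imp hb
        simpa [hp] using this
      have hdecomp : (a :: tl) = List.replicate c a ++ S₂ := by
        rw [← hrep, ← hS₂, List.takeWhile_append_dropWhile]
      have hcpos : 1 ≤ c := by rw [← hc, htw]; simp
      have hanotin : a ∉ S₂ := hS₂ ▸ not_mem_dropWhile_of_sorted a tl hs
      have hS₂sub : List.Sublist S₂ (a :: tl) := hS₂ ▸ List.dropWhile_sublist _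
      have hS₂sorted : S₂.Pairwise (· ≤ ·) := List.Pairwise.sublist hS₂sub hs
      have hS₂len : S₂.length ≤ n := by
        have h1 : S₂.length ≤ tl.length := by
          rw [← hS₂, hdw]; exact (List.dropWhile_sublist _).length_le
        have h2 : tl.length + 1 ≤ n + 1 := by simpa using hlen
        omega
      -- run the fold over the decomposition
      have hfold : (a :: tl).foldl pvScanStep (t, r, pr)
          = S₂.foldl pvScanStep (t + r * (r - 1), (c : Int), some a) := by
        rw [hdecomp, List.foldl_append]
        congr 1
        -- replicate c a with c ≥ 1: first element flushes, rest extends the run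
        obtain ⟨m, hm⟩ : ∃ m, c = m + 1 := ⟨c - 1, by omega⟩
        rw [hm, List.replicate_succ, List.foldl_cons]
        have hstep : pvScanStep (t, r, pr) a = (t + r * (r - 1), 1, some a) := by
          have : pr ≠ some a := hfresh a List.mem_cons_self
          simp [pvScanStep, this]
        rw [hstep, scan_replicate]
        have : (1 : Int) + (m : Int) = ((m + 1 : Nat) : Int) := by push_cast; ring
        rw [this]
      rw [hfold]
      have hfresh₂ : ∀ x ∈ S₂, (some a : Option Int) ≠ some x := by
        intro x hx h
        exact hanotin (by rw [Option.some.inj h]; exact hx)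
      rw [ih S₂ hS₂len hS₂sorted _ _ _ hfresh₂]
      -- arithmetic over counts: count a = c, counts of S₂ unchanged
      have hcount_a : (a :: tl).count a = c := by
        rw [hdecomp, List.count_append, List.count_replicate_self,
            List.count_eq_zero.mpr hanotin]
        omega
      have htofin : (a :: tl).toFinset = insert a S₂.toFinset := by
        rw [hdecomp]
        ext x
        simp only [List.mem_toFinset, List.mem_append, List.mem_replicate,
          Finset.mem_insert]
        constructor
        · rintro (⟨_, h⟩ | h) <;> [exact Or.inl h; exact Or.inr h]
        · rintro (h | h) <;> [exact Or.inl ⟨by omega, h⟩; exact Or.inr h]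
      have hcount_rest : ∀ x ∈ S₂.toFinset, (a :: tl).count x = S₂.count x := by
        intro x hx
        have hxa : x ≠ a := fun h => hanotin (h ▸ List.mem_toFinset.mp hx)
        rw [hdecomp, List.count_append, List.count_replicate]
        have : ¬ (a = x) := fun h => hxa h.symm
        simp [this]
      have hsum : pvSumCC (a :: tl) = (c : Int) * ((c : Int) - 1) + pvSumCC S₂ := by
        rw [pvSumCC, pvSumCC, htofin,
            Finset.sum_insert (by simpa [List.mem_toFinset] using hanotin)]
        congr 1
        · rw [hcount_a]
        · exact Finset.sum_congr rfl (fun x hx => by rw [hcount_rest x hx])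
      rw [hsum]; ring

-- ===== VERDICT (by name: the statement is the Claim_ definition above) =====
theorem tupleSameProduct_spec : Claim_equal_tupleSameProduct := by
  intro nums _
  unfold Spec_tupleSameProduct
  show tupleSameProduct nums = tupleSameProduct_alt nums
  unfold tupleSameProduct tupleSameProduct_alt
  simp only [foldA_eq, PySem.Dict.foldl_insert_getD_add_one_eq_counter]
  -- A side
  rw [countA_eq]
  -- B side: the sorted comprehension is sorted (pvProds nums)
  have hprod : ((PySem.List.pyRange 0 (nums.length : Int) 1).flatMap (fun i =>
      (PySem.List.pyRange (i + 1) (nums.length : Int) 1).map (fun j =>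
        PySem.List.pyGetD nums i 0 * PySem.List.pyGetD nums j 0))) = pvProds nums := rfl
  rw [hprod]
  set S := PySem.List.sorted (pvProds nums) (fun x => x) false with hS
  have hsorted : S.Pairwise (· ≤ ·) := by
    have := PySem.List.sorted_pairwise (pvProds nums) (fun x => x)
    simpa using this
  have hfresh : ∀ x ∈ S, (none : Option Int) ≠ some x := by intro x _ h; cases h
  have hB := scan_spec S.length S le_rfl hsorted 0 0 none hfresh
  have hperm : S.Perm (pvProds nums) := PySem.List.sorted_perm _ _ _
  have hsumeq : pvSumCC S = pvSumCC (pvProds nums) := by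
    rw [pvSumCC, pvSumCC]
    have htf : S.toFinset = (pvProds nums).toFinset := by
      ext x; simp [List.mem_toFinset, hperm.mem_iff]
    rw [htf]
    exact Finset.sum_congr rfl (fun x _ => by rw [hperm.count_eq])
  rw [hsumeq] at hB
  rw [hB]
  ring
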